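-- pv_equiv track=rewrite | github.com/djwtouw/CCN-code | utils/printing.py | pretty_label
-- ===== SOURCE A (Python) =====
-- def pretty_label(label):
--     # Capitalize first letter
--     temp = label[0].capitalize() + label[1:]
--
--     # Replace underscores by dashes if they are followed by a lower case letter
--     # and a space if they are followed by an upper case letter
--     result = ""
--     for i in range(len(temp)):
--         if temp[i] == "_" and i < len(temp) - 1:
--             result += " " if temp[i + 1].isupper() else "-"
--         else:
--             result += temp[i]
--
--     return result
-- ===== SOURCE B (Python) =====
-- def pretty_label(label):
--     # Capitalize first letter (raises IndexError on "" just like an empty index access)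
--     temp = label[0].capitalize() + label[1:]
--
--     # Split on underscores and rejoin: the separator before a non-empty part is
--     # a space if that part starts upper-case, else a dash; an empty part means
--     # the underscore was followed by another underscore (dash) or was the final
--     # character (kept as an underscore).
--     parts = temp.split("_")
--     pieces = [parts[0]]
--     for k in range(1, len(parts)):
--         p = parts[k]
--         if p:
--             pieces.append(" " if p[0].isupper() else "-")
--         elif k == len(parts) - 1:
--             pieces.append("_")
--         else:
--             pieces.append("-")
--         pieces.append(p)
--     return "".join(pieces)
-- ===== Notes on version B (the rewrite author's own statement) =====
-- stated objective: faster
-- what changed: Replaces the per-index scan that builds the result with repeated string += by splitting the string on underscores and rejoining the parts with ''.join, choosing each separator (space/dash/kept underscore) from the part that follows.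
-- outside the precondition, e.g. on pretty_label(''): A raises IndexError, B raises IndexError
import Mathlib
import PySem

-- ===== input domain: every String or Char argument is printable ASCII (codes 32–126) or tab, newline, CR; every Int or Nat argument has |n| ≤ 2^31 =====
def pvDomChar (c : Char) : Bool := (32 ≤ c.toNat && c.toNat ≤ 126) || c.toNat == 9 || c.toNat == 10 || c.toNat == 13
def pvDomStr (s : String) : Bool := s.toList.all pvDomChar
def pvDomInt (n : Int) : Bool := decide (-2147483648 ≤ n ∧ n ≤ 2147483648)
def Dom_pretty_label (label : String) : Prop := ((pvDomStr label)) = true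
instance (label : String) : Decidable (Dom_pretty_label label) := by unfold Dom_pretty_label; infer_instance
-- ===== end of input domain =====

-- B replaces A's per-index scan by split-on-underscore + rejoin (idiomatic; same result).

-- ===== PORT A =====
-- A: capitalize first char, then for each index i copy temp[i], except an
-- underscore with a successor becomes ' ' (successor upper) or '-'.
def pretty_label (label : String) : String :=
  match label.toList with
  | [] => ""          -- unreachable under Pre_: label[0] raises IndexError on ""
  | c :: rest =>
    let temp := PySem.Chars.upperChar c :: rest
    let result := (PySem.List.pyRange 0 (temp.length : Int) 1).foldl
      (fun result i =>
        if PySem.List.pyGetD temp i ' ' = '_' ∧ i < (temp.length : Int) - 1 then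
          result ++ [if PySem.Chars.isupper (PySem.List.pyGetD temp (i + 1) ' ') then ' ' else '-']
        else
          result ++ [PySem.List.pyGetD temp i ' '])
      ([] : List Char)
    String.mk result

-- ===== PORT B =====
-- temp.split("_")  (single-character separator, Python semantics: keeps empty parts)
def pvSplitU : List Char → List (List Char)
  | [] => [[]]
  | c :: t =>
    if c = '_' then [] :: pvSplitU t
    else
      match pvSplitU t with
      | [] => [[c]]
      | p :: ps => (c :: p) :: ps

-- the loop over parts[1:]: separator from the part that follows the underscore
def pvGlue : List (List Char) → List Char
  | [] => []
  | p :: ps =>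
    (match p with
     | q :: _ => [if PySem.Chars.isupper q then ' ' else '-']
     | [] => if ps = [] then ['_'] else ['-']) ++ p ++ pvGlue ps

def pretty_label_alt (label : String) : String :=
  match label.toList with
  | [] => ""          -- unreachable under Pre_: label[0] raises IndexError on ""
  | c :: rest =>
    let temp := PySem.Chars.upperChar c :: rest
    match pvSplitU temp with
    | [] => ""
    | p0 :: ps => String.mk (p0 ++ pvGlue ps)

-- ===== PRECONDITION & SPEC =====
-- Pre_ excludes only the empty string, on which A (label[0]) raises IndexError.
def Pre_pretty_label (label : String) : Prop := label ≠ ""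
instance (label : String) : Decidable (Pre_pretty_label label) := by unfold Pre_pretty_label; infer_instance
def pvWitness_pretty_label : String := "hello_World__x_"
def Spec_pretty_label (label : String) (out : String) : Prop := out = pretty_label_alt label
instance (label : String) (out : String) : Decidable (Spec_pretty_label label out) := by unfold Spec_pretty_label; infer_instance

-- ===== CLAIM (what is proved, stated in full; the proofs are below) =====
def Claim_equal_pretty_label : Prop := ∀ (label : String), Dom_pretty_label label → Pre_pretty_label label → Spec_pretty_label label (pretty_label label)

-- ===== LEMMAS AND PROOFS =====

-- reference single-pass description of the transformation
def pvScan : List Char → List Char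
  | [] => []
  | [c] => [c]
  | c :: d :: t =>
    (if c = '_' then (if PySem.Chars.isupper d then ' ' else '-') else c) :: pvScan (d :: t)

theorem pvSplitU_ne_nil (t : List Char) : pvSplitU t ≠ [] := by
  cases t with
  | nil => simp [pvSplitU]
  | cons c t =>
    simp only [pvSplitU]
    split
    · simp
    · cases h : pvSplitU t <;> simp

-- combined invariant for the split-and-rejoin side
theorem pvSplit_glue_scan (t : List Char) :
    (match pvSplitU t with | [] => [] | p :: ps => p ++ pvGlue ps) = pvScan t ∧
    pvGlue (pvSplitU t) =
      (match t with
       | [] => ['_']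
       | d :: _ => (if PySem.Chars.isupper d then ' ' else '-') :: pvScan t) := by
  induction t with
  | nil => simp [pvSplitU, pvGlue, pvScan]
  | cons c t ih =>
    obtain ⟨ih1, ih2⟩ := ih
    by_cases hc : c = '_'
    · subst hc
      have h1 : (match pvSplitU ('_' :: t) with | [] => [] | p :: ps => p ++ pvGlue ps) =
          pvScan ('_' :: t) := by
        simp only [pvSplitU, reduceIte, List.nil_append]
        rw [ih2]
        cases t with
        | nil => simp [pvScan]
        | cons d t' => simp [pvScan]
      refine ⟨h1, ?_⟩
      simp only [pvSplitU, reduceIte, pvGlue]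
      have hne := pvSplitU_ne_nil t
      simp only [if_neg hne]
      rw [ih2]
      cases t with
      | nil => simp [pvScan, PySem.Chars.isupper]
      | cons d t' => simp [pvScan, PySem.Chars.isupper]
    · have hsp : ∃ p ps, pvSplitU t = p :: ps := by
        cases h : pvSplitU t with
        | nil => exact absurd h (pvSplitU_ne_nil t)
        | cons p ps => exact ⟨p, ps, rfl⟩
      obtain ⟨p, ps, hps⟩ := hsp
      have h1 : (match pvSplitU (c :: t) with | [] => [] | p :: ps => p ++ pvGlue ps) =
          pvScan (c :: t) := by
        simp only [pvSplitU, if_neg hc, hps]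
        rw [hps] at ih1
        cases t with
        | nil =>
          simp [pvSplitU] at hps
          obtain ⟨hp, hps'⟩ := hps
          subst hp; subst hps'
          simp [pvGlue, pvScan]
        | cons d t' =>
          simp only [pvScan, if_neg hc]
          simpa using ih1
      refine ⟨h1, ?_⟩
      simp only [pvSplitU, if_neg hc, hps, pvGlue]
      simp only [pvSplitU, if_neg hc, hps] at h1
      simpa [pvScan, if_neg hc] using h1

-- A's index fold over a suffix computes pvScan of that suffix
theorem pvFold_scan (suf pre : List Char) (acc : List Char) :
    (PySem.List.pyRange (pre.length : Int) ((pre ++ suf).length : Int) 1).foldl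
      (fun result i =>
        if PySem.List.pyGetD (pre ++ suf) i ' ' = '_' ∧ i < ((pre ++ suf).length : Int) - 1 then
          result ++ [if PySem.Chars.isupper (PySem.List.pyGetD (pre ++ suf) (i + 1) ' ') then ' ' else '-']
        else
          result ++ [PySem.List.pyGetD (pre ++ suf) i ' '])
      acc = acc ++ pvScan suf := by
  induction suf generalizing pre acc with
  | nil =>
    rw [List.append_nil, PySem.List.pyRange_one_eq_nil (le_refl _)]
    simp [pvScan]
  | cons c suf' ih =>
    have hlen : ((pre ++ c :: suf').length : Int) = (pre.length : Int) + (suf'.length + 1) := by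
      simp
    have hlt : (pre.length : Int) < ((pre ++ c :: suf').length : Int) := by rw [hlen]; omega
    rw [PySem.List.pyRange_one_cons hlt, List.foldl_cons]
    have hget : PySem.List.pyGetD (pre ++ c :: suf') (pre.length : Int) ' ' = c := by
      rw [PySem.List.pyGetD_natCast]
      simp [List.getD]
    have hsplit : pre ++ c :: suf' = (pre ++ [c]) ++ suf' := by simp
    have hlen1 : (pre.length : Int) + 1 = (((pre ++ [c]).length : Nat) : Int) := by simp
    have step : ∀ x : Char,
        (PySem.List.pyRange ((pre.length : Int) + 1) ((pre ++ c :: suf').length : Int) 1).foldl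
          (fun result i =>
            if PySem.List.pyGetD (pre ++ c :: suf') i ' ' = '_' ∧ i < ((pre ++ c :: suf').length : Int) - 1 then
              result ++ [if PySem.Chars.isupper (PySem.List.pyGetD (pre ++ c :: suf') (i + 1) ' ') then ' ' else '-']
            else
              result ++ [PySem.List.pyGetD (pre ++ c :: suf') i ' '])
          (acc ++ [x]) = acc ++ [x] ++ pvScan suf' := by
      intro x
      rw [hlen1]
      conv_lhs => rw [hsplit]
      exact ih (pre ++ [c]) (acc ++ [x])
    by_cases hund : c = '_' ∧ (pre.length : Int) < ((pre ++ c :: suf').length : Int) - 1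
    · rw [hget, if_pos hund]
      obtain ⟨hc, hbound⟩ := hund
      have hsne : suf' ≠ [] := by
        intro h; subst h; rw [hlen] at hbound; simp at hbound
      obtain ⟨d, t', rfl⟩ := List.exists_cons_of_ne_nil hsne
      have hget1 : PySem.List.pyGetD (pre ++ c :: d :: t') ((pre.length : Int) + 1) ' ' = d := by
        rw [hlen1]
        have : (pre ++ [c]) ++ d :: t' = pre ++ c :: d :: t' := by simp
        rw [← this, PySem.List.pyGetD_natCast]
        simp [List.getD]
      rw [hget1, step]
      subst hc
      simp [pvScan]
    · rw [hget, if_neg hund, step]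
      have : pvScan (c :: suf') = c :: pvScan suf' := by
        cases suf' with
        | nil => simp [pvScan]
        | cons d t' =>
          have hc : ¬ c = '_' := by
            intro h
            exact hund ⟨h, by rw [hlen]; simp; omega⟩
          simp [pvScan, hc]
      rw [this]
      simp
    

-- ===== VERDICT (by name: the statement is the Claim_ definition above) =====
theorem pretty_label_spec : Claim_equal_pretty_label := by
  intro label _ hpre
  unfold Spec_pretty_label pretty_label pretty_label_alt
  cases h : label.toList with
  | nil => exact absurd (String.toList_eq_nil_iff.mp h) hpre
  | cons c rest =>
    have hA := pvFold_scan (PySem.Chars.upperChar c :: rest) [] []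
    simp only [List.nil_append, List.length_nil, Nat.cast_zero] at hA
    obtain ⟨h1, h2⟩ := pvSplit_glue_scan (PySem.Chars.upperChar c :: rest)
    cases hsp : pvSplitU (PySem.Chars.upperChar c :: rest) with
    | nil => exact absurd hsp (pvSplitU_ne_nil _)
    | cons p ps =>
      rw [hsp] at h1
      simp only at h1
      dsimp only
      rw [hsp]
      exact congrArg String.mk (hA.trans h1.symm)
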